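-- pv_equiv track=rewrite | github.com/MaochengXiong/PythonLearning | socketL/zhangll/server/game/poker.py | isOneCardSeq
-- ===== SOURCE A (Python) =====
-- def isOneCardSeq(value):
--     temp = sorted(value)
--     if len(value) < 5:
--         return False
--     for j in range(len(temp) - 1):
--         if temp[j] + 1 != temp[j + 1]:
--             return False
--     return True
-- ===== SOURCE B (Python) =====
-- def isOneCardSeq(value):
--     if len(value) < 5:
--         return False
--     return len(set(value)) == len(value) and max(value) - min(value) == len(value) - 1
-- ===== Notes on version B (the rewrite author's own statement) =====
-- stated objective: simpler
-- what changed: Replaces the sort-then-adjacent-scan with a closed-form test: all elements distinct and max-min span equals len-1.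
import Mathlib
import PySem

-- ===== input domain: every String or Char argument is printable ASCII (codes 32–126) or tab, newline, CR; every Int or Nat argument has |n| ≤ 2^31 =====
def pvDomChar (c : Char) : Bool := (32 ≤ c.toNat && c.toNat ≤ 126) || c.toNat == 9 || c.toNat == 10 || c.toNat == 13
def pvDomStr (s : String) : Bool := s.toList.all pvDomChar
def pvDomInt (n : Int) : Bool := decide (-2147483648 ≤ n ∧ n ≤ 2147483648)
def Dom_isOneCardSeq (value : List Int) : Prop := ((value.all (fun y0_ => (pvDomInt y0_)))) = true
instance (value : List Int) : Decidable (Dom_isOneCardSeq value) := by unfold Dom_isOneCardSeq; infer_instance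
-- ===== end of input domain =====

-- B replaces A's sort-then-adjacent-scan by a closed-form test (distinct elements and max-min span = len-1); return values agree everywhere.

-- ===== PORT A =====
def isOneCardSeq (value : List Int) : Bool :=
  let temp := PySem.List.sorted value (fun x => x) false
  if value.length < 5 then false
  else
    (List.range (temp.length - 1)).all
      (fun j => PySem.List.pyGetD temp (j : Int) 0 + 1 == PySem.List.pyGetD temp ((j : Int) + 1) 0)

-- ===== PORT B =====
def isOneCardSeq_alt (value : List Int) : Bool :=
  if value.length < 5 then false
  else
    decide ((PySem.Set.ofList value).length = value.length)
      && ((PySem.List.max? value (fun x => x)).getD 0 - (PySem.List.min? value (fun x => x)).getD 0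
            == (value.length : Int) - 1)

-- ===== PRECONDITION & SPEC =====
def Spec_isOneCardSeq (value : List Int) (out : Bool) : Prop := out = isOneCardSeq_alt value
instance (value : List Int) (out : Bool) : Decidable (Spec_isOneCardSeq value out) := by unfold Spec_isOneCardSeq; infer_instance

-- ===== CLAIM (what is proved, stated in full; the proofs are below) =====
def Claim_equal_isOneCardSeq : Prop := ∀ (value : List Int), Dom_isOneCardSeq value → Spec_isOneCardSeq value (isOneCardSeq value)

-- ===== LEMMAS AND PROOFS =====

-- (Set.ofList value).length = value.length ↔ value.Nodup
theorem pv_ofList_len_iff_nodup (xs : List Int) :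
    (PySem.Set.ofList xs).length = xs.length ↔ xs.Nodup := by
  constructor
  · intro h
    have hperm : (PySem.Set.ofList xs).Perm xs.dedup := by
      rw [List.perm_ext_iff_of_nodup (PySem.Set.nodup_ofList xs) xs.nodup_dedup]
      intro a
      simp [PySem.Set.mem_ofList, List.mem_dedup]
    have hlen : xs.dedup.length = xs.length := by
      rw [← hperm.length_eq]; exact h
    have : xs.dedup = xs := (List.dedup_sublist xs).eq_of_length hlen
    exact List.dedup_eq_self.mp this
  · intro h
    rw [PySem.Set.ofList_eq_self_of_nodup xs h]

-- strictly increasing by index: i ≤ k → t[i] + (k - i) ≤ t[k]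
theorem pv_strict_gap (t : List Int)
    (hst : ∀ i j, ∀ (hij : i < j) (hj : j < t.length), t[i]'(by omega) < t[j])
    (i k : Nat) (hik : i ≤ k) (hk : k < t.length) :
    t[i]'(by omega) + ((k : Int) - i) ≤ t[k] := by
  induction k with
  | zero =>
    have : i = 0 := by omega
    subst this; simp
  | succ m ih =>
    rcases Nat.lt_or_ge i (m+1) with hlt | hge
    · have hi : i ≤ m := by omega
      have h1 := ih hi (by omega)
      have h2 := hst m (m+1) (by omega) hk
      push_cast
      omega
    · have : i = m + 1 := by omega
      subst this; simp

theorem pv_main (value : List Int) :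
    isOneCardSeq value = isOneCardSeq_alt value := by
  unfold isOneCardSeq isOneCardSeq_alt
  by_cases hlen : value.length < 5
  · simp [hlen]
  · simp only [hlen, if_false]
    set t := PySem.List.sorted value (fun x => x) false with ht
    have htperm : t.Perm value := PySem.List.sorted_perm value (fun x => x) false
    have htlen : t.length = value.length := htperm.length_eq
    have hne : 0 < t.length := by omega
    have hnev : value ≠ [] := by
      intro h; subst h; simp at hlen
    -- monotone indices on the sorted list
    have hmono : ∀ p q, ∀ (hpq : p ≤ q) (hq : q < t.length), t[p]'(by omega) ≤ t[q] :=
      fun p q hpq hq => PySem.List.sorted_id_getElem_mono value hpq hq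
    rw [Bool.eq_iff_iff]
    -- characterize A's loop
    have hA : ((List.range (t.length - 1)).all
        (fun j => PySem.List.pyGetD t (j : Int) 0 + 1 == PySem.List.pyGetD t ((j : Int) + 1) 0)) = true
        ↔ ∀ j, ∀ (hj : j + 1 < t.length), t[j]'(by omega) + 1 = t[j+1]'hj := by
      simp only [List.all_eq_true, List.mem_range, beq_iff_eq]
      constructor
      · intro h j hj
        have hh := h j (by omega)
        have e1 : PySem.List.pyGetD t (j : Int) 0 = t[j]'(by omega) := by
          rw [PySem.List.pyGetD_natCast]; exact List.getD_eq_getElem _ _ _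
        have e2 : PySem.List.pyGetD t ((j : Int) + 1) 0 = t[j+1]'hj := by
          have e : ((j : Int) + 1) = ((j + 1 : Nat) : Int) := by push_cast; ring
          rw [e, PySem.List.pyGetD_natCast]; exact List.getD_eq_getElem _ _ _
        rw [e1, e2] at hh; exact hh
      · intro h j hj
        have hj' : j + 1 < t.length := by omega
        have hh := h j hj'
        have e1 : PySem.List.pyGetD t (j : Int) 0 = t[j]'(by omega) := by
          rw [PySem.List.pyGetD_natCast]; exact List.getD_eq_getElem _ _ _
        have e2 : PySem.List.pyGetD t ((j : Int) + 1) 0 = t[j+1]'hj' := by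
          have e : ((j : Int) + 1) = ((j + 1 : Nat) : Int) := by push_cast; ring
          rw [e, PySem.List.pyGetD_natCast]; exact List.getD_eq_getElem _ _ _
        rw [e1, e2]; exact hh
    rw [hA]
    simp only [Bool.and_eq_true, decide_eq_true_eq, beq_iff_eq]
    obtain ⟨mx, hmx⟩ := Option.ne_none_iff_exists'.mp
      (fun h => hnev ((PySem.List.max?_eq_none_iff value (fun x => x)).mp h))
    obtain ⟨mn, hmn⟩ := Option.ne_none_iff_exists'.mp
      (fun h => hnev ((PySem.List.min?_eq_none_iff value (fun x => x)).mp h))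
    rw [hmx, hmn]
    simp only [Option.getD_some]
    have hmxmem : mx ∈ t := htperm.mem_iff.mpr (PySem.List.max?_mem hmx)
    have hmnmem : mn ∈ t := htperm.mem_iff.mpr (PySem.List.min?_mem hmn)
    obtain ⟨i, hi, hie⟩ := List.getElem_of_mem hmxmem
    obtain ⟨i2, hi2, hie2⟩ := List.getElem_of_mem hmnmem
    have hlastmem : t[t.length - 1]'(by omega) ∈ value := htperm.subset (List.getElem_mem _)
    have h0mem : t[0]'hne ∈ value := htperm.subset (List.getElem_mem _)
    have hub := PySem.List.max?_isMax hmx _ hlastmem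
    have hlb := PySem.List.min?_isMin hmn _ h0mem
    simp only at hub hlb
    have e1 : mx = t[t.length - 1]'(by omega) := by
      refine le_antisymm ?_ hub
      rw [← hie]; exact hmono i (t.length - 1) (by omega) (by omega)
    have e2 : mn = t[0]'hne := by
      refine le_antisymm hlb ?_
      rw [← hie2]; exact hmono 0 i2 (by omega) hi2
    rw [e1, e2]
    have hcast : ((t.length - 1 : Nat) : Int) = (value.length : Int) - 1 := by omega
    constructor
    · -- A's chain holds → B's closed form
      intro hchain
      have harith : ∀ k, ∀ (hk : k < t.length), t[k] = t[0]'hne + k := by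
        intro k
        induction k with
        | zero => intro _; simp
        | succ m ih =>
          intro hk
          have h1 := hchain m hk
          have h2 := ih (by omega)
          push_cast
          omega
      have hstrict : ∀ i j, ∀ (hij : i < j) (hj : j < t.length), t[i]'(by omega) < t[j] := by
        intro i j hij hj
        rw [harith i (by omega), harith j hj]
        omega
      have hnodup : t.Nodup := by
        rw [List.nodup_iff_getElem?_ne_getElem?]
        intro i j hij hj
        rw [List.getElem?_eq_getElem (by omega), List.getElem?_eq_getElem hj]
        simp only [ne_eq, Option.some.injEq]
        exact (hstrict i j hij hj).ne
      refine ⟨(pv_ofList_len_iff_nodup value).mpr (htperm.nodup hnodup), ?_⟩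
      rw [harith (t.length - 1) (by omega), hcast]
      ring
    · -- B's closed form → A's chain
      rintro ⟨hdistinct, hspan⟩
      have hnodup : t.Nodup := (htperm.nodup_iff).mpr ((pv_ofList_len_iff_nodup value).mp hdistinct)
      have hstrict : ∀ i j, ∀ (hij : i < j) (hj : j < t.length), t[i]'(by omega) < t[j] := by
        intro i j hij hj
        have hle := hmono i j (by omega) hj
        have hne' : t[i]'(by omega) ≠ t[j] := by
          have hx := List.nodup_iff_getElem?_ne_getElem?.mp hnodup i j hij hj
          rw [List.getElem?_eq_getElem (by omega), List.getElem?_eq_getElem hj] at hx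
          simpa using hx
        exact lt_of_le_of_ne hle hne'
      intro j hj
      have g1 := pv_strict_gap t hstrict 0 j (by omega) (by omega)
      have g2 := pv_strict_gap t hstrict 0 (j+1) (by omega) hj
      have g3 := pv_strict_gap t hstrict j (t.length - 1) (by omega) (by omega)
      have g4 := pv_strict_gap t hstrict (j+1) (t.length - 1) (by omega) (by omega)
      rw [hcast] at g3 g4
      push_cast at g1 g2 g3 g4 ⊢
      omega

-- ===== VERDICT (by name: the statement is the Claim_ definition above) =====
theorem isOneCardSeq_spec : Claim_equal_isOneCardSeq := by
  intro value _
  unfold Spec_isOneCardSeq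
  exact pv_main value
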